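-- pv_equiv track=rewrite | github.com/Anshidtk/Attendance | main.py | graduation_prob
-- ===== SOURCE A (Python) =====
-- def graduation_prob(N):
--     dp = [0] * (N + 1)
--     dp[0] = 1
--     dp[1] = 2
--     dp[2] = 4
--     dp[3] = 7
--     for i in range(4, N + 1):
--         dp[i] = dp[i - 1] + dp[i - 2] + dp[i - 3]
--     total_ways = 2 ** N
--     ways_to_miss = total_ways - dp[N]
--     return ways_to_miss
-- ===== SOURCE B (Python) =====
-- def graduation_prob(N):
--     # Tribonacci-style count dp[N] computed by 3x3 matrix exponentiation
--     # (binary powering), then 2**N - dp[N].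
--     def mul(X, Y):
--         (a, b, c), (d, e, f), (g, h, i) = X
--         (p, q, r), (s, t, u), (v, w, x) = Y
--         return ((a * p + b * s + c * v, a * q + b * t + c * w, a * r + b * u + c * x),
--                 (d * p + e * s + f * v, d * q + e * t + f * w, d * r + e * u + f * x),
--                 (g * p + h * s + i * v, g * q + h * t + i * w, g * r + h * u + i * x))
--
--     M = ((1, 1, 1), (1, 0, 0), (0, 1, 0))
--     R = ((1, 0, 0), (0, 1, 0), (0, 0, 1))
--     e = N - 3
--     B = M
--     while e > 0:
--         if e & 1:
--             R = mul(R, B)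
--         B = mul(B, B)
--         e >>= 1
--     (a, b, c) = R[0]
--     dpN = a * 7 + b * 4 + c * 2
--     return 2 ** N - dpN
-- ===== Notes on version B (the rewrite author's own statement) =====
-- stated objective: faster
-- what changed: Replaces the O(N) dp-array recurrence loop with 3x3 matrix binary exponentiation (log N matrix multiplications) to compute the tribonacci-style count, then subtracts from 2**N as before.
import Mathlib
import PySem

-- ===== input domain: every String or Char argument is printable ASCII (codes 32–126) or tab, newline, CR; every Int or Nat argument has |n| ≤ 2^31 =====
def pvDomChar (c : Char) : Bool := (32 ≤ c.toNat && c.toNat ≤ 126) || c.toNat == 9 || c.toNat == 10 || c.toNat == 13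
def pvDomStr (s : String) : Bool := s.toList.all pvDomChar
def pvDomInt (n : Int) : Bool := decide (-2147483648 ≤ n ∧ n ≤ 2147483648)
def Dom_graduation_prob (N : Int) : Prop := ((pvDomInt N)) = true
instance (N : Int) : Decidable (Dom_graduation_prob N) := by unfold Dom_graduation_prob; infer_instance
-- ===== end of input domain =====

-- B replaces A's O(N) dp-array loop by 3x3 matrix binary exponentiation (O(log N)
-- big-int multiplications); equivalence of return values is proved for N ≥ 3
-- (on N < 3 Python A raises IndexError, excluded by Pre_).

-- ===== PORT A =====
-- dp[i] = v : PySem.List.pySetD (all indices are in range under Pre_, where it is exact);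
-- dp[i] reads: PySem.List.pyGetD (same remark); 2 ** N = 2 ^ N.toNat (exact for N ≥ 0).
def graduation_prob (N : Int) : Int :=
  let dp : List Int := List.replicate (N + 1).toNat 0
  let dp := PySem.List.pySetD dp 0 1
  let dp := PySem.List.pySetD dp 1 2
  let dp := PySem.List.pySetD dp 2 4
  let dp := PySem.List.pySetD dp 3 7
  let dp := (PySem.List.pyRange 4 (N + 1) 1).foldl
    (fun dp i =>
      PySem.List.pySetD dp i
        (PySem.List.pyGetD dp (i - 1) 0 + PySem.List.pyGetD dp (i - 2) 0 +
          PySem.List.pyGetD dp (i - 3) 0)) dp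
  let total_ways : Int := 2 ^ N.toNat
  let ways_to_miss := total_ways - PySem.List.pyGetD dp N 0
  ways_to_miss

-- ===== PORT B =====
-- 3x3 integer matrix as a triple of row triples
def M3 : Type := (Int × Int × Int) × (Int × Int × Int) × (Int × Int × Int)

def m3mul (X Y : M3) : M3 :=
  let ((a, b, c), (d, e, f), (g, h, i)) := X
  let ((p, q, r), (s, t, u), (v, w, x)) := Y
  ((a * p + b * s + c * v, a * q + b * t + c * w, a * r + b * u + c * x),
   (d * p + e * s + f * v, d * q + e * t + f * w, d * r + e * u + f * x),
   (g * p + h * s + i * v, g * q + h * t + i * w, g * r + h * u + i * x))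

def m3M : M3 := ((1, 1, 1), (1, 0, 0), (0, 1, 0))
def m3I : M3 := ((1, 0, 0), (0, 1, 0), (0, 0, 1))

-- the 'while e > 0' binary-powering loop of Source B, recursion on the Nat exponent
def m3powLoop (R B : M3) (e : Nat) : M3 :=
  if e = 0 then R
  else m3powLoop (if e % 2 = 1 then m3mul R B else R) (m3mul B B) (e / 2)
decreasing_by exact Nat.div_lt_self (Nat.pos_of_ne_zero (by assumption)) (by norm_num)

def graduation_prob_alt (N : Int) : Int :=
  let R := m3powLoop m3I m3M (N - 3).toNat   -- e = N - 3; e ≤ 0 skips the loop, as in Python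
  let (a, b, c) := R.1
  let dpN := a * 7 + b * 4 + c * 2
  2 ^ N.toNat - dpN                          -- 2 ** N, exact for N ≥ 0

-- ===== PRECONDITION & SPEC =====
-- Python A raises IndexError for every N < 3 (dp too short for the seed writes), so
-- Pre_ admits exactly N ≥ 3.
def Pre_graduation_prob (N : Int) : Prop := 3 ≤ N
instance (N : Int) : Decidable (Pre_graduation_prob N) := by unfold Pre_graduation_prob; infer_instance
def pvWitness_graduation_prob : Int := 5

def Spec_graduation_prob (N : Int) (out : Int) : Prop := out = graduation_prob_alt N
instance (N : Int) (out : Int) : Decidable (Spec_graduation_prob N out) := by unfold Spec_graduation_prob; infer_instance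

-- ===== CLAIM (what is proved, stated in full; the proofs are below) =====
def Claim_equal_graduation_prob : Prop := ∀ (N : Int), Dom_graduation_prob N → Pre_graduation_prob N → Spec_graduation_prob N (graduation_prob N)

-- ===== LEMMAS AND PROOFS =====
-- the tribonacci-style sequence both programs compute
def trib : Nat → Int
  | 0 => 1
  | 1 => 2
  | 2 => 4
  | n + 3 => trib (n + 2) + trib (n + 1) + trib n


-- B-side: matrix algebra ------------------------------------------------------
def m3pow (X : M3) : Nat → M3
  | 0 => m3I
  | n + 1 => m3mul (m3pow X n) X

theorem m3mul_I_left (X : M3) : m3mul m3I X = X := by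
  obtain ⟨⟨a, b, c⟩, ⟨d, e, f⟩, ⟨g, h, i⟩⟩ := X
  simp [m3mul, m3I]

theorem m3mul_I_right (X : M3) : m3mul X m3I = X := by
  obtain ⟨⟨a, b, c⟩, ⟨d, e, f⟩, ⟨g, h, i⟩⟩ := X
  simp [m3mul, m3I]

theorem m3mul_assoc (X Y Z : M3) : m3mul (m3mul X Y) Z = m3mul X (m3mul Y Z) := by
  obtain ⟨⟨a, b, c⟩, ⟨d, e, f⟩, ⟨g, h, i⟩⟩ := X
  obtain ⟨⟨p, q, r⟩, ⟨s, t, u⟩, ⟨v, w, x⟩⟩ := Y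
  obtain ⟨⟨a2, b2, c2⟩, ⟨d2, e2, f2⟩, ⟨g2, h2, i2⟩⟩ := Z
  show (_ = (_ : M3))
  simp only [m3mul]
  refine Prod.ext ?_ (Prod.ext ?_ ?_) <;> refine Prod.ext ?_ (Prod.ext ?_ ?_) <;> dsimp only <;> ring

theorem m3pow_add (X : M3) (a b : Nat) :
    m3pow X (a + b) = m3mul (m3pow X a) (m3pow X b) := by
  induction b with
  | zero => simp [m3pow, m3mul_I_right]
  | succ b ih => simp [m3pow, ih, m3mul_assoc]

theorem m3pow_sq (X : M3) (k : Nat) : m3pow (m3mul X X) k = m3pow X (2 * k) := by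
  induction k with
  | zero => simp [m3pow]
  | succ k ih =>
      have h2 : 2 * (k + 1) = 2 * k + 1 + 1 := by ring
      simp [m3pow, ih, m3mul_assoc]

theorem m3powLoop_eq (e : Nat) (R B : M3) :
    m3powLoop R B e = m3mul R (m3pow B e) := by
  induction e using Nat.strong_induction_on generalizing R B with
  | _ e ih =>
    rw [m3powLoop]
    by_cases h0 : e = 0
    · simp [h0, m3pow, m3mul_I_right]
    · rw [if_neg h0, ih (e / 2) (Nat.div_lt_self (Nat.pos_of_ne_zero h0) (by norm_num))]
      have key : m3pow B e = m3mul (m3pow B (e % 2)) (m3pow B (2 * (e / 2))) := by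
        rw [← m3pow_add]; congr 1; omega
      rw [m3pow_sq, key]
      by_cases h1 : e % 2 = 1
      · rw [if_pos h1, h1]
        simp [m3pow, m3mul_I_left, m3mul_assoc]
      · have h2 : e % 2 = 0 := by omega
        rw [if_neg h1, h2]
        simp [m3pow, m3mul_I_left]

-- applying a matrix to a column vector
def vapp (X : M3) (v : Int × Int × Int) : Int × Int × Int :=
  let ((a, b, c), (d, e, f), (g, h, i)) := X
  let (p, q, r) := v
  (a * p + b * q + c * r, d * p + e * q + f * r, g * p + h * q + i * r)

theorem vapp_I (v : Int × Int × Int) : vapp m3I v = v := by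
  obtain ⟨p, q, r⟩ := v
  simp [vapp, m3I]

theorem vapp_mul (X Y : M3) (v : Int × Int × Int) :
    vapp (m3mul X Y) v = vapp X (vapp Y v) := by
  obtain ⟨⟨a, b, c⟩, ⟨d, e, f⟩, ⟨g, h, i⟩⟩ := X
  obtain ⟨⟨p, q, r⟩, ⟨s, t, u⟩, ⟨v1, w, x⟩⟩ := Y
  obtain ⟨p2, q2, r2⟩ := v
  simp only [m3mul, vapp, Prod.mk.injEq]
  exact ⟨by ring, by ring, by ring⟩

def tribVec (j : Nat) : Int × Int × Int := (trib (j + 3), trib (j + 2), trib (j + 1))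

theorem vapp_M_tribVec (j : Nat) : vapp m3M (tribVec j) = tribVec (j + 1) := by
  simp only [m3M, vapp, tribVec]
  refine Prod.ext ?_ (Prod.ext ?_ ?_) <;> simp [trib]

theorem vapp_pow_tribVec (k j : Nat) :
    vapp (m3pow m3M k) (tribVec j) = tribVec (k + j) := by
  induction k generalizing j with
  | zero => simp [m3pow, vapp_I]
  | succ k ih =>
      rw [m3pow, vapp_mul, vapp_M_tribVec, ih]
      congr 1
      omega

theorem alt_eq_trib (N : Int) (hN : 3 ≤ N) :
    graduation_prob_alt N = 2 ^ N.toNat - trib N.toNat := by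
  have h := vapp_pow_tribVec ((N - 3).toNat) 0
  rw [Nat.add_zero] at h
  have hbase : tribVec 0 = (7, 4, 2) := by decide
  rw [hbase] at h
  unfold graduation_prob_alt
  rw [m3powLoop_eq, m3mul_I_left]
  set P := m3pow m3M ((N - 3).toNat) with hP
  obtain ⟨⟨a, b, c⟩, rest⟩ := P
  simp only [vapp, tribVec] at h
  have h1 := congrArg Prod.fst h
  simp only at h1
  have hk : (N - 3).toNat + 3 = N.toNat := by omega
  rw [hk] at h1
  simp only []
  rw [h1]

-- A-side ----------------------------------------------------------------------

-- A-side ----------------------------------------------------------------------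
theorem getD_set_lt (l : List Int) (n i : Nat) (v : Int) (hi : i < l.length) :
    (l.set n v).getD i 0 = if n = i then v else l.getD i 0 := by
  by_cases h1 : n = i
  · subst h1
    simp [List.getD_eq_getElem?_getD, hi]
  · simp [List.getD_eq_getElem?_getD, h1]

-- the body of A's for-loop
def Astep (dp : List Int) (i : Int) : List Int :=
  PySem.List.pySetD dp i
    (PySem.List.pyGetD dp (i - 1) 0 + PySem.List.pyGetD dp (i - 2) 0 +
      PySem.List.pyGetD dp (i - 3) 0)

theorem A_loop (L : Nat) (dp0 : List Int) (hlen : dp0.length = L)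
    (hseed : ∀ i : Nat, i ≤ 3 → i < L → dp0.getD i 0 = trib i) :
    ∀ k : Nat, 4 + k ≤ L →
      ((PySem.List.pyRange 4 (4 + (k : Int)) 1).foldl Astep dp0).length = L ∧
      ∀ i : Nat, i < 4 + k →
        ((PySem.List.pyRange 4 (4 + (k : Int)) 1).foldl Astep dp0).getD i 0 = trib i := by
  intro k
  induction k with
  | zero =>
      intro hkL
      rw [PySem.List.pyRange_one_eq_nil (by norm_num)]
      refine ⟨hlen, fun i hi => hseed i (by omega) (by omega)⟩
  | succ k ih =>
      intro hkL
      obtain ⟨ihlen, ihval⟩ := ih (by omega)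
      have hsplit : PySem.List.pyRange 4 (4 + ((k + 1 : Nat) : Int)) 1
          = PySem.List.pyRange 4 (4 + (k : Int)) 1 ++ [4 + (k : Int)] := by
        have : (4 + ((k + 1 : Nat) : Int)) = (4 + (k : Int)) + 1 := by push_cast; ring
        rw [this, PySem.List.pyRange_one_succ_right (by omega)]
      rw [hsplit, List.foldl_append]
      set dpk := (PySem.List.pyRange 4 (4 + (k : Int)) 1).foldl Astep dp0 with hdpk
      simp only [List.foldl_cons, List.foldl_nil]
      have hcast : (4 + (k : Int)) = ((4 + k : Nat) : Int) := by push_cast; ring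
      have hg : ∀ m : Nat, m < 4 + k → PySem.List.pyGetD dpk ((m : Nat) : Int) 0 = trib m := by
        intro m hm
        rw [PySem.List.pyGetD_natCast]
        exact ihval m hm
      have h1 : (4 + (k : Int)) - 1 = ((3 + k : Nat) : Int) := by push_cast; ring
      have h2 : (4 + (k : Int)) - 2 = ((2 + k : Nat) : Int) := by push_cast; ring
      have h3 : (4 + (k : Int)) - 3 = ((1 + k : Nat) : Int) := by push_cast; ring
      have hv : Astep dpk (4 + (k : Int))
          = dpk.set (4 + k) (trib (3 + k) + trib (2 + k) + trib (1 + k)) := by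
        unfold Astep
        rw [h1, h2, h3, hg (3 + k) (by omega), hg (2 + k) (by omega), hg (1 + k) (by omega),
          hcast, PySem.List.pySetD_natCast]
      rw [hv]
      have htrib : trib (3 + k) + trib (2 + k) + trib (1 + k) = trib (4 + k) := by
        have e : trib (k + 1 + 3) = trib (k + 1 + 2) + trib (k + 1 + 1) + trib (k + 1) := rfl
        have a1 : 3 + k = k + 1 + 2 := by omega
        have a2 : 2 + k = k + 1 + 1 := by omega
        have a3 : 1 + k = k + 1 := by omega
        have a4 : 4 + k = k + 1 + 3 := by omega
        rw [a1, a2, a3, a4, e]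
      constructor
      · simp [ihlen]
      · intro i hi
        rw [getD_set_lt _ _ _ _ (by rw [ihlen]; omega)]
        by_cases hik : 4 + k = i
        · rw [if_pos hik, htrib, hik]
        · rw [if_neg hik]
          exact ihval i (by omega)

theorem seed_getD (L : Nat) (hL : 4 ≤ L) (i : Nat) (hi3 : i ≤ 3) :
    (((((List.replicate L (0 : Int)).set 0 1).set 1 2).set 2 4).set 3 7).getD i 0 = trib i := by
  interval_cases i <;>
    simp [List.getD_eq_getElem?_getD, List.getElem?_set] <;>
    rw [if_pos (by omega)] <;> rfl

theorem a_eq_trib (N : Int) (hN : 3 ≤ N) :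
    graduation_prob N = 2 ^ N.toNat - trib N.toNat := by
  have hL4 : 4 ≤ (N + 1).toNat := by omega
  have hrange : (4 : Int) + (((N + 1).toNat - 4 : Nat) : Int) = N + 1 := by omega
  unfold graduation_prob
  rw [show (fun dp i => PySem.List.pySetD dp i
      (PySem.List.pyGetD dp (i - 1) 0 + PySem.List.pyGetD dp (i - 2) 0 +
        PySem.List.pyGetD dp (i - 3) 0)) = Astep from rfl]
  norm_num [PySem.List.pySetD_of_nonneg]
  simp only [show Int.toNat 2 = 2 from rfl, show Int.toNat 3 = 3 from rfl]
  rw [show PySem.List.pyRange 4 (N + 1) 1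
      = PySem.List.pyRange 4 (4 + (((N + 1).toNat - 4 : Nat) : Int)) 1 from by rw [hrange]]
  obtain ⟨hlen, hval⟩ := A_loop (N + 1).toNat _ (by simp)
    (fun i h3 _ => seed_getD (N + 1).toNat hL4 i h3) ((N + 1).toNat - 4) (by omega)
  rw [PySem.List.pyGetD_eq_getElem _ 0 (by omega) (by rw [hlen]; omega)]
  have hv := hval N.toNat (by omega)
  rw [List.getD_eq_getElem _ _ (by rw [hlen]; omega)] at hv
  rw [hv]

-- ===== VERDICT (by name: the statement is the Claim_ definition above) =====
theorem graduation_prob_spec : Claim_equal_graduation_prob := by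
  intro N _ hPre
  unfold Spec_graduation_prob
  rw [a_eq_trib N hPre, alt_eq_trib N hPre]
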